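-- pv_equiv track=rewrite | github.com/Metta-AI/metta | common/src/metta/common/wandb/docs/generate_docs.py | group_related_metrics
-- ===== SOURCE A (Python) =====
-- from collections import defaultdict
--
-- def group_related_metrics(metrics):
--     """Group metrics by their base name, consolidating all related statistics."""
--     groups = defaultdict(list)
--
--     for metric in metrics:
--         # Remove the section prefix to get the metric path
--         parts = metric.split("/")
--         if len(parts) > 2:
--             metric_path = "/".join(parts[2:])
--         else:
--             metric_path = parts[-1]
--
--         # Find the base metric name by removing all known suffixes
--         base = metric_path
--
--         # List of base statistic suffixes
--         base_suffixes = [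
--             ".activity_rate",
--             ".avg",
--             ".std_dev",
--             ".min",
--             ".max",
--             ".first_step",
--             ".last_step",
--             ".rate",
--             ".updates",
--         ]
--
--         # Create list with .std_dev variants first (more specific patterns first)
--         stat_suffixes = [s + ".std_dev" for s in base_suffixes] + base_suffixes
--
--         # Remove the suffix to find the base
--         for suffix in stat_suffixes:
--             if base.endswith(suffix):
--                 base = base[: -len(suffix)]
--                 break
--
--         groups[base].append(metric)
--
--     return dict(groups)
-- ===== SOURCE B (Python) =====
-- _BASE_STATS = {
--     "activity_rate", "avg", "std_dev", "min", "max",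
--     "first_step", "last_step", "rate", "updates",
-- }
--
--
-- def group_related_metrics(metrics):
--     """Group metrics by their base name, consolidating all related statistics."""
--     groups = {}
--     for metric in metrics:
--         parts = metric.split("/")
--         if len(parts) > 2:
--             metric_path = "/".join(parts[2:])
--         else:
--             metric_path = parts[-1]
--
--         head, sep, tail = metric_path.rpartition(".")
--         if not sep:
--             base = metric_path
--         elif tail == "std_dev":
--             head2, sep2, tail2 = head.rpartition(".")
--             base = head2 if (sep2 and tail2 in _BASE_STATS) else head
--         elif tail in _BASE_STATS:
--             base = head
--         else:
--             base = metric_path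
--
--         groups.setdefault(base, []).append(metric)
--     return groups
-- ===== Notes on version B (the rewrite author's own statement) =====
-- stated objective: simpler
-- what changed: A precomputes 18 suffix strings and scans them with endswith/slicing per metric; B calls rpartition('.') (twice for the compound '.<stat>.std_dev' case) and tests the last token(s) against a set of the nine stat names, which a timing run also measured as a constant-factor speedup.
import Mathlib
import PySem

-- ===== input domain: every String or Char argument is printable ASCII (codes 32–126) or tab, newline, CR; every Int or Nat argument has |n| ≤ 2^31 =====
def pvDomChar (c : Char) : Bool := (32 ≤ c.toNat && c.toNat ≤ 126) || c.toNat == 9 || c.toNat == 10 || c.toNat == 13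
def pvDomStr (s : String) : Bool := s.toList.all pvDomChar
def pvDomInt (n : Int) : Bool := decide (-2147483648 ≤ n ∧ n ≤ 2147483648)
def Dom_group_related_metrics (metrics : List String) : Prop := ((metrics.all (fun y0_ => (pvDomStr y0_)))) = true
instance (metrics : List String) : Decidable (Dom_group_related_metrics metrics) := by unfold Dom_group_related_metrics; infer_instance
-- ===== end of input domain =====

-- B replaces A's scan over 18 precomputed endswith-suffixes by two rpartition('.') calls and a
-- set-membership test on the last token(s); objective: simpler (same asymptotic cost).

-- ===== PORT A =====
-- shared by both ports (identical Python lines in Source A and Source B):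
-- parts = metric.split("/"); "/".join(parts[2:]) if len(parts) > 2 else parts[-1]
def pvPath (metric : String) : List Char :=
  let parts := PySem.Chars.splitOn metric.toList ['/']
  if parts.length > 2 then
    PySem.Chars.join ['/'] (PySem.List.slice parts (some 2) none)
  else
    -- split always returns a non-empty list, so parts[-1] never raises; .getD [] is unreachable
    (PySem.List.pyGet? parts (-1)).getD []

def pvBaseSuffixes : List (List Char) :=
  [".activity_rate".toList, ".avg".toList, ".std_dev".toList, ".min".toList, ".max".toList,
   ".first_step".toList, ".last_step".toList, ".rate".toList, ".updates".toList]

-- stat_suffixes = [s + ".std_dev" for s in base_suffixes] + base_suffixes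
def pvStatSuffixes : List (List Char) :=
  pvBaseSuffixes.map (· ++ ".std_dev".toList) ++ pvBaseSuffixes

-- 'for suffix in stat_suffixes: if base.endswith(suffix): base = base[:-len(suffix)]; break'
def pvStripA (sufs : List (List Char)) (base : List Char) : List Char :=
  match sufs with
  | [] => base
  | suf :: rest =>
    if PySem.Chars.endswith base suf then
      PySem.List.slice base none (some (-(suf.length : Int)))
    else pvStripA rest base

def group_related_metrics (metrics : List String) : List (String × List String) :=
  -- defaultdict(list): groups[base].append(metric) is modify with default []
  (metrics.foldl (fun d metric =>
      d.modify (String.ofList (pvStripA pvStatSuffixes (pvPath metric))) [] (· ++ [metric]))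
    (PySem.Dict.empty : PySem.Dict String (List String))).items

-- ===== PORT B =====
def pvBaseStats : PySem.Set (List Char) :=
  PySem.Set.ofList
    ["activity_rate".toList, "avg".toList, "std_dev".toList, "min".toList, "max".toList,
     "first_step".toList, "last_step".toList, "rate".toList, "updates".toList]

-- hand port of s.rpartition(".") (PySem has no rpartition); exact for the one-char separator '.':
-- none encodes ("", "", s) (no '.' in s), some (head, tail) encodes (head, ".", tail)
def pvRpart (l : List Char) : Option (List Char × List Char) :=
  match l with
  | [] => none
  | c :: rest =>
    match pvRpart rest with
    | some (h, t) => some (c :: h, t)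
    | none => if c = '.' then some ([], rest) else none

def pvBaseB (p : List Char) : List Char :=
  match pvRpart p with
  | none => p
  | some (h, t) =>
    if t = "std_dev".toList then
      match pvRpart h with
      | some (h2, t2) => if t2 ∈ pvBaseStats then h2 else h
      | none => h
    else if t ∈ pvBaseStats then h else p

def group_related_metrics_alt (metrics : List String) : List (String × List String) :=
  -- groups.setdefault(base, []).append(metric)
  (metrics.foldl (fun d metric =>
      let base := String.ofList (pvBaseB (pvPath metric))
      (d.setdefault base []).modify base [] (· ++ [metric]))
    (PySem.Dict.empty : PySem.Dict String (List String))).items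

-- ===== PRECONDITION & SPEC =====
def Spec_group_related_metrics (metrics : List String) (out : List (String × List String)) : Prop := out = group_related_metrics_alt metrics
instance (metrics : List String) (out : List (String × List String)) : Decidable (Spec_group_related_metrics metrics out) := by unfold Spec_group_related_metrics; infer_instance

-- ===== CLAIM (what is proved, stated in full; the proofs are below) =====
def Claim_equal_group_related_metrics : Prop := ∀ (metrics : List String), Dom_group_related_metrics metrics → Spec_group_related_metrics metrics (group_related_metrics metrics)

-- ===== LEMMAS AND PROOFS =====

def pvNames : List (List Char) :=
  ["activity_rate".toList, "avg".toList, "std_dev".toList, "min".toList, "max".toList,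
   "first_step".toList, "last_step".toList, "rate".toList, "updates".toList]

theorem pvRpart_spec (l : List Char) :
    (∀ h t, pvRpart l = some (h, t) → l = h ++ '.' :: t ∧ '.' ∉ t) ∧
    (pvRpart l = none → '.' ∉ l) := by
  induction l with
  | nil => simp [pvRpart]
  | cons c rest ih =>
    obtain ⟨ihs, ihn⟩ := ih
    cases hr : pvRpart rest with
    | some p =>
      obtain ⟨h', t'⟩ := p
      obtain ⟨he, hn⟩ := ihs _ _ hr
      refine ⟨?_, ?_⟩
      · intro h t hp
        simp only [pvRpart, hr] at hp
        simp at hp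
        obtain ⟨hh, ht⟩ := hp
        subst hh; subst ht
        exact ⟨by rw [he]; simp, hn⟩
      · intro hp; simp only [pvRpart, hr] at hp; exact absurd hp (by simp)
    | none =>
      have hnr := ihn hr
      refine ⟨?_, ?_⟩
      · intro h t hp
        simp only [pvRpart, hr] at hp
        by_cases hc : c = '.'
        · simp [hc] at hp
          obtain ⟨hh, ht⟩ := hp
          subst hh; subst ht
          exact ⟨by simp [hc], hnr⟩
        · simp [hc] at hp
      · intro hp
        simp only [pvRpart, hr] at hp
        by_cases hc : c = '.'
        · simp [hc] at hp
        · simp [hnr]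
          intro h; exact hc h.symm

theorem pvRpart_none_iff (l : List Char) : pvRpart l = none ↔ '.' ∉ l := by
  constructor
  · exact (pvRpart_spec l).2
  · intro hn
    cases hp : pvRpart l with
    | none => rfl
    | some p =>
      obtain ⟨he, _⟩ := (pvRpart_spec l).1 p.1 p.2 (by rw [hp])
      exact absurd (by rw [he]; simp : '.' ∈ l) hn

theorem pvSuffix_iff (l h t u w : List Char) (hw : '.' ∉ w)
    (hp : pvRpart l = some (h, t)) :
    (u ++ '.' :: w <:+ l) ↔ (w = t ∧ u <:+ h) := by
  obtain ⟨he, hnt⟩ := (pvRpart_spec l).1 h t hp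
  constructor
  · rintro ⟨pre, hpre⟩
    have h1 : '.' :: w <:+ l := (List.suffix_append u ('.' :: w)).trans ⟨pre, hpre⟩
    have h2 : '.' :: t <:+ l := ⟨h, he.symm⟩
    have hwt : w = t := by
      rcases List.suffix_or_suffix_of_suffix h1 h2 with hs | hs
      · obtain ⟨p, hp2⟩ := hs
        cases p with
        | nil => simpa using hp2
        | cons a p' =>
          have h3 : p' ++ '.' :: w = t := (by simpa using hp2 : a = '.' ∧ p' ++ '.' :: w = t).2
          exact absurd (by rw [← h3]; simp : '.' ∈ t) hnt
      · obtain ⟨p, hp2⟩ := hs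
        cases p with
        | nil => exact (by simpa using hp2 : t = w).symm
        | cons a p' =>
          have h3 : p' ++ '.' :: t = w := (by simpa using hp2 : a = '.' ∧ p' ++ '.' :: t = w).2
          exact absurd (by rw [← h3]; simp : '.' ∈ w) hw
    subst hwt
    refine ⟨rfl, pre, ?_⟩
    have h4 : (pre ++ u) ++ '.' :: w = h ++ '.' :: w := by rw [List.append_assoc, hpre, he]
    exact List.append_cancel_right h4
  · rintro ⟨rfl, pre, hpre⟩
    exact ⟨pre, by rw [he, ← hpre]; simp⟩

theorem pvStripA_id (sufs : List (List Char)) (l : List Char)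
    (hall : ∀ s ∈ sufs, '.' ∈ s) (hl : '.' ∉ l) : pvStripA sufs l = l := by
  induction sufs with
  | nil => rfl
  | cons s rest ih =>
    have hf : PySem.Chars.endswith l s = false := by
      rw [Bool.eq_false_iff]
      intro he
      exact hl (((PySem.Chars.endswith_iff l s).mp he).subset (hall s (by simp)))
    simp only [pvStripA, hf, Bool.false_eq_true, if_false]
    exact ih (fun x hx => hall x (by simp [hx]))

theorem pvStripA_plain (ns : List (List Char)) (l h t : List Char)
    (hp : pvRpart l = some (h, t)) (hns : ∀ x ∈ ns, '.' ∉ x) :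
    pvStripA (ns.map (fun x => '.' :: x)) l = if t ∈ ns then h else l := by
  induction ns with
  | nil => simp [pvStripA]
  | cons x ns' ih =>
    have hx : '.' ∉ x := hns x (by simp)
    have hiff : PySem.Chars.endswith l ('.' :: x) = true ↔ x = t := by
      rw [PySem.Chars.endswith_iff, show ('.' :: x : List Char) = [] ++ '.' :: x from rfl,
        pvSuffix_iff l h t [] x hx hp]
      simp
    obtain ⟨he, hnt⟩ := (pvRpart_spec l).1 h t hp
    by_cases hxt : x = t
    · have hfire : PySem.Chars.endswith l ('.' :: x) = true := hiff.mpr hxt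
      simp only [List.map_cons, pvStripA, hfire, if_true]
      rw [PySem.List.slice_to_neg_natCast l ('.' :: x).length (by simp)]
      subst hxt
      rw [he]
      have hlen : (h ++ '.' :: x).length - ('.' :: x).length = h.length := by simp
      rw [hlen, List.take_left]
      simp
    · have hf : PySem.Chars.endswith l ('.' :: x) = false := by
        rw [Bool.eq_false_iff]; intro hc; exact hxt (hiff.mp hc)
      simp only [List.map_cons, pvStripA, hf, Bool.false_eq_true, if_false]
      rw [ih (fun y hy => hns y (by simp [hy]))]
      have hmem : t ∈ x :: ns' ↔ t ∈ ns' := by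
        constructor
        · intro hm
          rcases List.mem_cons.mp hm with hm | hm
          · exact absurd hm.symm hxt
          · exact hm
        · intro hm; exact List.mem_cons_of_mem x hm
      simp only [hmem]

theorem pvStripA_comp_some (ns rest : List (List Char)) (l h t h2 t2 std : List Char)
    (hstd : '.' ∉ std) (hp : pvRpart l = some (h, t)) (hq : pvRpart h = some (h2, t2))
    (hns : ∀ x ∈ ns, '.' ∉ x) :
    pvStripA (ns.map (fun x => '.' :: (x ++ '.' :: std)) ++ rest) l =
      if t = std ∧ t2 ∈ ns then h2 else pvStripA rest l := by
  induction ns with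
  | nil => simp
  | cons x ns' ih =>
    have hx : '.' ∉ x := hns x (by simp)
    have hiff : PySem.Chars.endswith l ('.' :: (x ++ '.' :: std)) = true ↔ (std = t ∧ x = t2) := by
      rw [PySem.Chars.endswith_iff,
        show ('.' :: (x ++ '.' :: std) : List Char) = ('.' :: x) ++ ('.' :: std) from rfl,
        pvSuffix_iff l h t ('.' :: x) std hstd hp,
        show ('.' :: x : List Char) = [] ++ '.' :: x from rfl, pvSuffix_iff h h2 t2 [] x hx hq]
      simp
    obtain ⟨he, hnt⟩ := (pvRpart_spec l).1 h t hp
    obtain ⟨he2, hnt2⟩ := (pvRpart_spec h).1 h2 t2 hq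
    by_cases hc : std = t ∧ x = t2
    · obtain ⟨hst, hxt⟩ := hc
      have hfire := hiff.mpr ⟨hst, hxt⟩
      simp only [List.map_cons, List.cons_append, pvStripA]
      rw [if_pos hfire]
      have hl2 : l = h2 ++ ('.' :: (x ++ '.' :: std)) := by
        rw [he, he2, hst, hxt]; simp
      rw [PySem.List.slice_to_neg_natCast l ('.' :: (x ++ '.' :: std)).length (by simp)]
      have hlen : l.length - ('.' :: (x ++ '.' :: std)).length = h2.length := by
        rw [hl2]; simp
      rw [hlen, hl2, List.take_left]
      rw [if_pos ⟨hst.symm, hxt ▸ List.mem_cons_self⟩]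
    · have hf : PySem.Chars.endswith l ('.' :: (x ++ '.' :: std)) = false := by
        rw [Bool.eq_false_iff]; intro hcc; exact hc (hiff.mp hcc)
      simp only [List.map_cons, List.cons_append, pvStripA]
      rw [if_neg (by rw [hf]; simp)]
      rw [ih (fun y hy => hns y (by simp [hy]))]
      by_cases hts : t = std
      · have hx2 : x ≠ t2 := fun hh => hc ⟨hts.symm, hh⟩
        have hmem : (t2 ∈ x :: ns') ↔ (t2 ∈ ns') := by
          constructor
          · intro hm
            rcases List.mem_cons.mp hm with hm | hm
            · exact absurd hm.symm hx2
            · exact hm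
          · exact List.mem_cons_of_mem x
        simp only [hts, true_and, hmem]
      · simp only [hts, false_and, if_false]

theorem pvStripA_comp_none (ns rest : List (List Char)) (l h t std : List Char)
    (hstd : '.' ∉ std) (hp : pvRpart l = some (h, t)) (hq : pvRpart h = none) :
    pvStripA (ns.map (fun x => '.' :: (x ++ '.' :: std)) ++ rest) l = pvStripA rest l := by
  obtain ⟨he, hnt⟩ := (pvRpart_spec l).1 h t hp
  have hnh : '.' ∉ h := (pvRpart_none_iff h).mp hq
  induction ns with
  | nil => simp
  | cons x ns' ih =>
    have hf : PySem.Chars.endswith l ('.' :: (x ++ '.' :: std)) = false := by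
      rw [Bool.eq_false_iff]
      intro hc
      have h1 := (pvSuffix_iff l h t ('.' :: x) std hstd hp).mp
        ((PySem.Chars.endswith_iff _ _).mp
          (by rw [show (('.' :: x) ++ ('.' :: std) : List Char) = '.' :: (x ++ '.' :: std) from rfl]; exact hc))
      exact hnh (h1.2.subset (by simp))
    simp only [List.map_cons, List.cons_append, pvStripA]
    rw [if_neg (by rw [hf]; simp)]
    exact ih

theorem pvMem_baseStats (x : List Char) : x ∈ pvBaseStats ↔ x ∈ pvNames := by
  unfold pvBaseStats pvNames
  rw [PySem.Set.mem_ofList]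

theorem pvSplit_suffixes :
    pvStatSuffixes = pvNames.map (fun x => '.' :: (x ++ '.' :: "std_dev".toList)) ++
      pvNames.map (fun x => '.' :: x) := by decide

theorem pvStripA_eq_pvBaseB (l : List Char) : pvStripA pvStatSuffixes l = pvBaseB l := by
  rw [pvSplit_suffixes]
  have hns : ∀ x ∈ pvNames, '.' ∉ x := by decide
  have hstd : ('.' : Char) ∉ "std_dev".toList := by decide
  cases hp : pvRpart l with
  | none =>
    rw [pvStripA_id _ l (by decide) ((pvRpart_none_iff l).mp hp)]
    simp [pvBaseB, hp]
  | some p =>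
    obtain ⟨h, t⟩ := p
    cases hq : pvRpart h with
    | some q =>
      obtain ⟨h2, t2⟩ := q
      rw [pvStripA_comp_some pvNames _ l h t h2 t2 _ hstd hp hq hns,
          pvStripA_plain pvNames l h t hp hns]
      simp only [pvBaseB, hp, hq]
      have hsd : (['s', 't', 'd', '_', 'd', 'e', 'v'] : List Char) ∈ pvNames := by decide
      by_cases hts : t = "std_dev".toList
      · by_cases h2m : t2 ∈ pvNames
        · simp [hts, pvMem_baseStats, h2m]
        · simp [hts, pvMem_baseStats, h2m, hsd]
      · have hts' : ¬ t = (['s', 't', 'd', '_', 'd', 'e', 'v'] : List Char) := by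
          simpa using hts
        simp [hts', pvMem_baseStats]
    | none =>
      rw [pvStripA_comp_none pvNames _ l h t _ hstd hp hq,
          pvStripA_plain pvNames l h t hp hns]
      simp only [pvBaseB, hp, hq]
      have hsd : (['s', 't', 'd', '_', 'd', 'e', 'v'] : List Char) ∈ pvNames := by decide
      by_cases hts : t = "std_dev".toList
      · simp [hts, hsd]
      · have hts' : ¬ t = (['s', 't', 'd', '_', 'd', 'e', 'v'] : List Char) := by
          simpa using hts
        simp [hts', pvMem_baseStats]

theorem pvStep_eq (d : PySem.Dict String (List String)) (k m : String) :
    d.modify k [] (· ++ [m]) = (d.setdefault k []).modify k [] (· ++ [m]) := by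
  by_cases hc : d.contains k = true
  · rw [PySem.Dict.setdefault_of_contains d ([] : List String) hc]
  · have hc' : d.contains k = false := by simpa using hc
    have hall : ∀ p ∈ d.items, (p.1 == k) = false := by
      intro p hp
      by_contra hne
      have : d.contains k = true := by
        unfold PySem.Dict.contains
        exact List.any_eq_true.mpr ⟨p, hp, by simpa using hne⟩
      rw [this] at hc'; cases hc'
    unfold PySem.Dict.modify
    rw [PySem.Dict.getD_setdefault_self, PySem.Dict.getD_of_not_contains d ([] : List String) hc']
    rw [PySem.Dict.setdefault_of_not_contains d ([] : List String) hc']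
    apply PySem.Dict.ext
    unfold PySem.Dict.insert PySem.Dict.contains
    have hany : (d.items.any fun p => p.1 == k) = false := by
      rw [List.any_eq_false]
      intro p hp
      simp [hall p hp]
    have hany2 : ((d.items ++ [(k, ([] : List String))]).any fun p => p.1 == k) = true := by
      rw [List.any_eq_true]
      exact ⟨(k, []), by simp⟩
    simp only [hany, hany2, Bool.false_eq_true, if_false, if_true]
    rw [List.map_append]
    have hmap : d.items.map (fun p => if (p.1 == k) = true then (k, ([] : List String) ++ [m]) else p) = d.items := by
      conv_rhs => rw [← List.map_id d.items]
      apply List.map_congr_left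
      intro p hp
      simp [hall p hp]
    rw [hmap]
    simp

-- ===== VERDICT (by name: the statement is the Claim_ definition above) =====
theorem group_related_metrics_spec : Claim_equal_group_related_metrics := by
  intro metrics _
  unfold Spec_group_related_metrics group_related_metrics group_related_metrics_alt
  have hfun : (fun (d : PySem.Dict String (List String)) metric =>
        d.modify (String.ofList (pvStripA pvStatSuffixes (pvPath metric))) [] (· ++ [metric])) =
      (fun (d : PySem.Dict String (List String)) metric =>
        let base := String.ofList (pvBaseB (pvPath metric))
        (d.setdefault base []).modify base [] (· ++ [metric])) := by
    funext d metric
    rw [pvStripA_eq_pvBaseB]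
    exact pvStep_eq d _ metric
  rw [hfun]
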